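-- pv_equiv track=rewrite | github.com/fyk943749465/LLeetCode | leetcode3700/leetcode3649.py | perfectPairs
-- ===== SOURCE A (Python) =====
-- from typing import List
--
-- def perfectPairs(nums: List[int]) -> int:
--
--     nums.sort(key=lambda x: abs(x))
--     ans = left = 0
--     for j, b in enumerate(nums):
--         while abs(nums[left]) * 2 < abs(b):
--             left += 1
--         ans += j - left
--     return ans
-- ===== SOURCE B (Python) =====
-- from typing import List
--
-- def perfectPairs(nums: List[int]) -> int:
--     nums.sort(key=lambda x: abs(x))          # same in-place sort side effect as A
--     absvals = [abs(x) for x in nums]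
--     n = len(absvals)
--     ans = 0
--     for j in range(n):
--         target = (absvals[j] + 1) // 2       # 2*x >= absvals[j]  <=>  x >= target
--         lo, hi = 0, n
--         while lo < hi:                        # binary search: first index with absvals[idx] >= target
--             mid = (lo + hi) // 2
--             if absvals[mid] < target:
--                 lo = mid + 1
--             else:
--                 hi = mid
--         ans += j - lo
--     return ans
-- ===== Notes on version B (the rewrite author's own statement) =====
-- stated objective: alternative
-- what changed: Replaces A's stateful monotone two-pointer sweep with an independent hand-written binary search over the sorted absolute values for each index, using the integer ceiling threshold (|x|+1)//2; the in-place sort of nums is kept.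
import Mathlib
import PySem

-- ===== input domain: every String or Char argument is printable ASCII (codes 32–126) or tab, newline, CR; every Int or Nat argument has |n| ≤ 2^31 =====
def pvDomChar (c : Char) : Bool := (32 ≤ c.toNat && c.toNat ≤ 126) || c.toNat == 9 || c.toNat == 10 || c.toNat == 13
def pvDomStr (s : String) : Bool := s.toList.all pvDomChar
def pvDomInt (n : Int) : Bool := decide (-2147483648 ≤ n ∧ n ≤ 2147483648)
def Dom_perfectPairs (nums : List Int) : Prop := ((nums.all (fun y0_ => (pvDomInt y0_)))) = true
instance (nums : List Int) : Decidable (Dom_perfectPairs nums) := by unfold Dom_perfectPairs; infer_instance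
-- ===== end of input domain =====

-- B replaces A's stateful two-pointer sweep by an independent hand-written binary search per
-- index over the sorted absolute values (objective: alternative). Both A and B sort `nums`
-- in place by absolute value (same observable mutation); the equivalence proved is about the
-- return value.

-- ===== PORT A =====
-- while abs(nums[left]) * 2 < abs(b): left += 1   (fuel-bounded; fuel s.length + 1 always
-- suffices since left grows by 1 per step and the loop stops once left is out of range;
-- pyGet? = none, i.e. the IndexError case, is unreachable in A's runs because left ≤ j)
def pvAdvance (s : List Int) (b : Int) (left : Int) : Nat → Int
  | 0 => left
  | fuel+1 =>
    match PySem.List.pyGet? s left with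
    | none => left
    | some v => if |v| * 2 < |b| then pvAdvance s b (left + 1) fuel else left

def perfectPairs (nums : List Int) : Int :=
  let s := PySem.List.sorted nums (fun x => |x|) false
  let r := (PySem.List.enumerate s 0).foldl
      (fun (st : Int × Int) (jb : Int × Int) =>
        let left := pvAdvance s jb.2 st.2 (s.length + 1)
        (st.1 + jb.1 - left, left)) (0, 0)
  r.1

-- ===== PORT B =====
-- the hand-written binary-search while loop of Source B (fuel a.length + 1 suffices: hi - lo
-- shrinks by at least 1 per step; pyGet? = none is unreachable since 0 ≤ lo ≤ mid < hi ≤ n)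
def pvBSearch (a : List Int) (target : Int) : Nat → Int → Int → Int
  | 0, lo, _ => lo
  | fuel+1, lo, hi =>
    if lo < hi then
      let mid := PySem.Int.floordiv (lo + hi) 2
      match PySem.List.pyGet? a mid with
      | none => lo
      | some v =>
        if v < target then pvBSearch a target fuel (mid + 1) hi
        else pvBSearch a target fuel lo mid
    else lo

def perfectPairs_alt (nums : List Int) : Int :=
  let s := PySem.List.sorted nums (fun x => |x|) false
  let a := s.map (fun x => |x|)
  let n : Int := (a.length : Int)
  (PySem.List.pyRange 0 n 1).foldl
    (fun ans j =>
      let target := PySem.Int.floordiv (PySem.List.pyGetD a j 0 + 1) 2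
      let lo := pvBSearch a target (a.length + 1) 0 n
      ans + j - lo) 0

-- ===== PRECONDITION & SPEC =====
def Spec_perfectPairs (nums : List Int) (out : Int) : Prop := out = perfectPairs_alt nums
instance (nums : List Int) (out : Int) : Decidable (Spec_perfectPairs nums out) := by unfold Spec_perfectPairs; infer_instance

-- ===== CLAIM (what is proved, stated in full; the proofs are below) =====
def Claim_equal_perfectPairs : Prop := ∀ (nums : List Int), Dom_perfectPairs nums → Spec_perfectPairs nums (perfectPairs nums)

-- ===== LEMMAS AND PROOFS =====

-- number of elements x of a with 2*x < t (for sorted a: the final two-pointer position)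
def pvM (a : List Int) (t : Int) : Nat := a.countP (fun x => decide (2 * x < t))

-- the ceiling threshold of B matches A's doubled comparison
lemma pv_thresh (x t : Int) : (x < PySem.Int.floordiv (t + 1) 2) ↔ 2 * x < t := by
  rw [PySem.Int.floordiv_eq_ediv_of_pos (by omega)]
  omega

-- in a sorted list, a downward-closed predicate holds exactly on the prefix it counts
lemma pv_sorted_char (a : List Int) (p : Int → Bool)
    (hp : ∀ x y : Int, x ≤ y → p y = true → p x = true)
    (hs : a.Pairwise (· ≤ ·)) :
    ∀ k, (hk : k < a.length) → (p a[k] = true ↔ k < a.countP p) := by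
  induction a with
  | nil => intro k hk; simp at hk
  | cons x xs ih =>
    rcases List.pairwise_cons.mp hs with ⟨hx, hxs⟩
    intro k hk
    rw [List.countP_cons]
    cases k with
    | zero =>
      simp only [List.getElem_cons_zero]
      by_cases hpx : p x = true
      · simp [hpx]
      · have h0 : xs.countP p = 0 := by
          rw [List.countP_eq_zero]
          intro y hy hpy
          exact hpx (hp x y (hx y hy) hpy)
        simp [hpx, h0]
    | succ k =>
      simp only [List.getElem_cons_succ]
      have hk' : k < xs.length := by simpa using hk
      by_cases hpx : p x = true
      · rw [ih hxs k hk']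
        simp [hpx]
      · have h0 : xs.countP p = 0 := by
          rw [List.countP_eq_zero]
          intro y hy hpy
          exact hpx (hp x y (hx y hy) hpy)
        have : p xs[k] ≠ true := by
          intro hpk
          have := List.countP_pos_iff.mpr ⟨xs[k], List.getElem_mem hk', hpk⟩
          omega
        simp [hpx, h0, this]

lemma pv_M_char (a : List Int) (t : Int) (hs : a.Pairwise (· ≤ ·)) :
    ∀ k, (hk : k < a.length) → (2 * a[k] < t ↔ k < pvM a t) := by
  intro k hk
  have := pv_sorted_char a (fun x => decide (2 * x < t))
    (by intro x y hxy hy; simp at hy ⊢; omega) hs k hk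
  simpa [pvM] using this

lemma pv_M_le_len (a : List Int) (t : Int) : pvM a t ≤ a.length :=
  List.countP_le_length

lemma pv_M_mono (a : List Int) {t t' : Int} (h : t ≤ t') : pvM a t ≤ pvM a t' := by
  apply List.countP_mono_left
  intro x _ hx
  simp at hx ⊢
  omega

-- A's inner while loop lands exactly at pvM
lemma pv_advance_eq (s : List Int) (hs : (s.map (fun x => |x|)).Pairwise (· ≤ ·))
    (b : Int) :
    ∀ (fuel l : Nat), l ≤ pvM (s.map (fun x => |x|)) |b| →
      s.length - l ≤ fuel →
      pvAdvance s b (l : Int) fuel = (pvM (s.map (fun x => |x|)) |b| : Int) := by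
  set a := s.map (fun x => |x|) with ha
  have hlen : a.length = s.length := by simp [ha]
  intro fuel
  induction fuel with
  | zero =>
    intro l hl hfuel
    have hm := pv_M_le_len a |b|
    have : l = pvM a |b| := by omega
    simp [pvAdvance, this]
  | succ fuel ih =>
    intro l hl hfuel
    by_cases hlt : l < s.length
    · have hget : PySem.List.pyGet? s (l : Int) = some s[l] := by
        rw [PySem.List.pyGet?_natCast]
        exact List.getElem?_eq_getElem hlt
      have hal : a[l]'(by omega) = |s[l]| := by simp [ha]
      have hchar := pv_M_char a |b| hs l (by omega)
      rw [hal] at hchar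
      by_cases hc : |s[l]| * 2 < |b|
      · have hlm : l < pvM a |b| := hchar.mp (by omega)
        have : ((l : Int) + 1) = ((l + 1 : Nat) : Int) := by push_cast; ring
        rw [pvAdvance, hget]
        simp only [hc, if_true, this]
        exact ih (l + 1) (by omega) (by omega)
      · have : ¬ l < pvM a |b| := fun h => hc (by have := hchar.mpr h; omega)
        have hleq : l = pvM a |b| := by omega
        rw [pvAdvance, hget]
        simp only [hc, if_false]
        exact_mod_cast hleq
    · have hget : PySem.List.pyGet? s (l : Int) = none := by
        rw [PySem.List.pyGet?_natCast]
        exact List.getElem?_eq_none (by omega)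
      have hm := pv_M_le_len a |b|
      have hleq : l = pvM a |b| := by omega
      rw [pvAdvance, hget, hleq]

-- B's binary search lands exactly at the count of elements below target
lemma pv_bsearch_eq (a : List Int) (target : Int) (hs : a.Pairwise (· ≤ ·)) :
    ∀ (fuel lo hi : Nat), hi ≤ a.length →
      lo ≤ a.countP (fun x => decide (x < target)) →
      a.countP (fun x => decide (x < target)) ≤ hi →
      hi - lo ≤ fuel →
      pvBSearch a target fuel (lo : Int) (hi : Int)
        = (a.countP (fun x => decide (x < target)) : Int) := by
  set m := a.countP (fun x => decide (x < target)) with hm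
  have hchar : ∀ k, (hk : k < a.length) → (a[k] < target ↔ k < m) := by
    intro k hk
    have := pv_sorted_char a (fun x => decide (x < target))
      (by intro x y hxy hy; simp at hy ⊢; omega) hs k hk
    simpa [hm] using this
  intro fuel
  induction fuel with
  | zero =>
    intro lo hi _ hlo hhi hfuel
    have : lo = m := by omega
    simp [pvBSearch, this]
  | succ fuel ih =>
    intro lo hi hhilen hlo hhi hfuel
    by_cases hlt : lo < hi
    · have hltI : (lo : Int) < (hi : Int) := by exact_mod_cast hlt
      have hmidc : (lo : Int) + (hi : Int) = ((lo + hi : Nat) : Int) := by push_cast; ring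
      have hmid : PySem.Int.floordiv ((lo : Int) + (hi : Int)) 2 = (((lo + hi) / 2 : Nat) : Int) := by
        rw [hmidc]; exact_mod_cast PySem.Int.floordiv_natCast (lo + hi) 2
      set midN := (lo + hi) / 2 with hmidN
      have hlo_mid : lo ≤ midN := by omega
      have hmid_hi : midN < hi := by omega
      have hget : PySem.List.pyGet? a ((midN : Nat) : Int) = some (a[midN]'(by omega)) := by
        rw [PySem.List.pyGet?_natCast]
        exact List.getElem?_eq_getElem (by omega)
      rw [pvBSearch]
      simp only [hltI, if_true, hmid, hget]
      have hcmid := hchar midN (by omega)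
      by_cases hc : a[midN]'(by omega) < target
      · have hmm : midN < m := hcmid.mp hc
        simp only [hc, if_true]
        have : ((midN : Nat) : Int) + 1 = ((midN + 1 : Nat) : Int) := by push_cast; ring
        rw [this]
        exact ih (midN + 1) hi hhilen (by omega) hhi (by omega)
      · have hmm : m ≤ midN := by
          by_contra h
          exact hc (hcmid.mpr (by omega))
        simp only [hc, if_false]
        exact ih lo midN (by omega) hlo hmm (by omega)
    · have hltI : ¬ (lo : Int) < (hi : Int) := by exact_mod_cast hlt
      have : lo = m := by omega
      rw [pvBSearch, if_neg hltI, this]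

-- the two thresholds count the same elements
lemma pv_count_eq (a : List Int) (t : Int) :
    a.countP (fun x => decide (x < PySem.Int.floordiv (t + 1) 2)) = pvM a t := by
  unfold pvM
  apply List.countP_congr
  intro x _
  simpa using pv_thresh x t

-- main loop correspondence, by induction on the remaining suffix
lemma pv_main (s : List Int) (hs : (s.map (fun x => |x|)).Pairwise (· ≤ ·)) :
    ∀ (d j : Nat), j + d = s.length → ∀ (ans : Int) (l : Nat),
      (∀ k, j ≤ k → (hk : k < s.length) → l ≤ pvM (s.map (fun x => |x|)) |s[k]|) →
      ((PySem.List.enumerate (s.drop j) (j : Int)).foldl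
          (fun (st : Int × Int) (jb : Int × Int) =>
            let left := pvAdvance s jb.2 st.2 (s.length + 1)
            (st.1 + jb.1 - left, left)) (ans, (l : Int))).1
        = (PySem.List.pyRange (j : Int) ((s.map (fun x => |x|)).length : Int) 1).foldl
            (fun ans j =>
              let target := PySem.Int.floordiv
                (PySem.List.pyGetD (s.map (fun x => |x|)) j 0 + 1) 2
              let lo := pvBSearch (s.map (fun x => |x|)) target
                ((s.map (fun x => |x|)).length + 1) 0 ((s.map (fun x => |x|)).length : Int)
              ans + j - lo) ans := by
  set a := s.map (fun x => |x|) with ha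
  have hlen : a.length = s.length := by simp [ha]
  intro d
  induction d with
  | zero =>
    intro j hj ans l _
    have hj' : j = s.length := by omega
    have hdrop : s.drop j = [] := by simp [hj']
    have hrange : PySem.List.pyRange (j : Int) (a.length : Int) 1 = [] := by
      rw [hlen, hj']; simp [pysem]
    rw [hdrop, hrange]
    simp [PySem.List.enumerate]
  | succ d ih =>
    intro j hj ans l hl
    have hjlt : j < s.length := by omega
    have hdrop : s.drop j = s[j] :: s.drop (j + 1) := List.drop_eq_getElem_cons hjlt
    have hrange : PySem.List.pyRange (j : Int) (a.length : Int) 1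
        = (j : Int) :: PySem.List.pyRange ((j : Int) + 1) (a.length : Int) 1 := by
      exact PySem.List.pyRange_one_cons (by rw [hlen]; exact_mod_cast hjlt)
    have haj : a[j]'(by omega) = |s[j]| := by simp [ha]
    -- A's step
    have hadv : pvAdvance s s[j] (l : Int) (s.length + 1) = (pvM a |s[j]| : Int) :=
      pv_advance_eq s hs s[j] (s.length + 1) l (hl j le_rfl hjlt) (by omega)
    -- B's step
    have hgetD : PySem.List.pyGetD a (j : Int) 0 = a[j]'(by omega) := by
      rw [PySem.List.pyGetD_natCast]
      exact List.getD_eq_getElem a 0 (by omega)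
    have hbs : pvBSearch a (PySem.Int.floordiv (|s[j]| + 1) 2) (a.length + 1)
        0 (a.length : Int) = (pvM a |s[j]| : Int) := by
      have h0 := pv_bsearch_eq a (PySem.Int.floordiv (|s[j]| + 1) 2) hs (a.length + 1) 0
        a.length le_rfl (by omega)
        (by rw [pv_count_eq]; exact pv_M_le_len a _) (by omega)
      rw [pv_count_eq] at h0
      simpa using h0
    rw [hdrop, hrange, PySem.List.enumerate_cons]
    simp only [List.foldl_cons]
    have hstep : ((j : Int) + 1) = (((j + 1 : Nat)) : Int) := by push_cast; ring
    rw [hstep]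
    have := ih (j + 1) (by omega) (ans + (j : Int) - (pvM a |s[j]| : Int)) (pvM a |s[j]|)
      (by
        intro k hk hklt
        have hjk : |s[j]| ≤ |s[k]| := by
          have hp := List.pairwise_iff_getElem.mp hs j k (by omega) (by omega) (by omega)
          simpa [ha] using hp
        exact pv_M_mono a hjk)
    rw [hadv, hgetD]
    simp only [haj]
    rw [hbs]
    exact this

-- ===== VERDICT (by name: the statement is the Claim_ definition above) =====
theorem perfectPairs_spec : Claim_equal_perfectPairs := by
  intro nums _
  unfold Spec_perfectPairs perfectPairs perfectPairs_alt
  set s := PySem.List.sorted nums (fun x => |x|) false with hsdef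
  have hs : (s.map (fun x => |x|)).Pairwise (· ≤ ·) := by
    have := PySem.List.sorted_map_key_pairwise (xs := nums) (key := fun x => |x|)
    simpa [hsdef] using this
  have := pv_main s hs s.length 0 (by omega) 0 0
    (by intro k _ _; exact Nat.zero_le _)
  simpa using this
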